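-- pv_equiv track=rewrite | github.com/SebastienDorgan/hylight-powerlines | src/hylight_powerlines/curate.py | _build_id_map
-- ===== SOURCE A (Python) =====
-- from collections.abc import Iterable, Sequence
--
-- def _build_id_map(
--     old_names: Sequence[str],
--     drop_classes: list[str],
-- ) -> tuple[dict[int, int | None], list[str]]:
--     """Build mapping old_id -> new_id (or None) and resulting name list.
--
--     Any class whose name == drop_class is removed (mapped to None).
--     Other classes are reindexed to keep ids contiguous.
--     """
--     id_map: dict[int, int | None] = {}
--     new_names: list[str] = []
--     new_idx = 0
--
--     for old_id, name in enumerate(old_names):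
--         if name in drop_classes:
--             id_map[old_id] = None
--         else:
--             id_map[old_id] = new_idx
--             new_names.append(name)
--             new_idx += 1
--
--     return id_map, new_names
-- ===== SOURCE B (Python) =====
-- def _build_id_map(old_names, drop_classes):
--     dropped = set(drop_classes)
--     keep = [name not in dropped for name in old_names]
--     new_names = [name for name, k in zip(old_names, keep) if k]
--     counts = [0]
--     for k in keep:
--         counts.append(counts[-1] + k)
--     id_map = {i: (counts[i] if k else None) for i, k in enumerate(keep)}
--     return id_map, new_names
-- ===== Notes on version B (the rewrite author's own statement) =====
-- stated objective: faster
-- what changed: Replaces A's single stateful loop (running new-index counter, per-name linear scan of drop_classes) by a stateless decomposition: a set of dropped names, a keep-mask, a filtered name list, a prefix-count list, and a dict comprehension reading each new id off the prefix counts.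
import Mathlib
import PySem

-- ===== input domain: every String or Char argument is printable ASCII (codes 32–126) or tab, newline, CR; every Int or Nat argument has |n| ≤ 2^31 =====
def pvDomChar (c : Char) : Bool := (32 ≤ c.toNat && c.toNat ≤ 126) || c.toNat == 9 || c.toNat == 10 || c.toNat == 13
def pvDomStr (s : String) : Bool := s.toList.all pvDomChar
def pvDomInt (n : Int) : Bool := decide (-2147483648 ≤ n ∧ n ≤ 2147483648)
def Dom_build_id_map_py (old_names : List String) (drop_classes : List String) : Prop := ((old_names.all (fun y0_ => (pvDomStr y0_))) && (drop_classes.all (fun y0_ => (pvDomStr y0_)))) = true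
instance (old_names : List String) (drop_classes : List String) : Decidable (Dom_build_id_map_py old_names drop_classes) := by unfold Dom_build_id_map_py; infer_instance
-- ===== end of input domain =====

-- B replaces A's single stateful loop (running new-index counter) by a stateless decomposition:
-- a drop-set, a keep-mask, a filtered name list, a prefix-count list, and a dict comprehension
-- reading each new id off the prefix counts (objective: faster — set lookup instead of A's
-- inner list scan).

-- ===== PORT A =====
-- literal transliteration of A's single loop over enumerate(old_names) with state
-- (id_map, new_names, new_idx)
def build_id_map_py (old_names : List String) (drop_classes : List String) : (List (Int × Option Int)) × List String :=
  let st := (PySem.List.enumerate old_names 0).foldl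
    (fun (st : PySem.Dict Int (Option Int) × List String × Int) (p : Int × String) =>
      if drop_classes.contains p.2 then
        (st.1.insert p.1 none, st.2.1, st.2.2)
      else
        (st.1.insert p.1 (some st.2.2), st.2.1 ++ [p.2], st.2.2 + 1))
    (PySem.Dict.empty, [], 0)
  (st.1.items, st.2.1)

-- ===== PORT B =====
-- literal transliteration of Source B: set(drop_classes) is the distinct-elements list
-- (PySem.List.dedup), keep-mask, zip/filter comprehension for new_names, the counts loop
-- (counts[-1] is pyGetD acc (-1); the appended bool adds 1 or 0), and the dict comprehension
-- reading counts[i] (the enumerate index i is ≥ 0, so pyGetD is exact)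
def build_id_map_py_alt (old_names : List String) (drop_classes : List String) : (List (Int × Option Int)) × List String :=
  let dropped := PySem.List.dedup drop_classes
  let keep := old_names.map (fun name => !(dropped.contains name))
  let new_names := ((old_names.zip keep).filter (fun p => p.2)).map (fun p => p.1)
  let counts := keep.foldl
    (fun (acc : List Int) (k : Bool) =>
      acc ++ [PySem.List.pyGetD acc (-1) 0 + (if k then (1 : Int) else 0)])
    [(0 : Int)]
  let id_map := (PySem.List.enumerate keep 0).foldl
    (fun (d : PySem.Dict Int (Option Int)) (p : Int × Bool) =>
      d.insert p.1 (if p.2 then some (PySem.List.pyGetD counts p.1 0) else none))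
    PySem.Dict.empty
  (id_map.items, new_names)

-- ===== PRECONDITION & SPEC =====
def Spec_build_id_map_py (old_names : List String) (drop_classes : List String) (out : (List (Int × Option Int)) × List String) : Prop := out = build_id_map_py_alt old_names drop_classes
instance (old_names : List String) (drop_classes : List String) (out : (List (Int × Option Int)) × List String) : Decidable (Spec_build_id_map_py old_names drop_classes out) := by unfold Spec_build_id_map_py; infer_instance

-- ===== CLAIM (what is proved, stated in full; the proofs are below) =====
def Claim_equal_build_id_map_py : Prop := ∀ (old_names : List String) (drop_classes : List String), Dom_build_id_map_py old_names drop_classes → Spec_build_id_map_py old_names drop_classes (build_id_map_py old_names drop_classes)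

-- ===== LEMMAS AND PROOFS =====

-- common description of the id_map items both programs produce: entry (k, new id or none)
-- for each name, with running old id k and running new-id counter c
def specGen (drop : List String) : List String → Int → Int → List (Int × Option Int)
  | [], _, _ => []
  | n :: t, k, c =>
    if drop.contains n then (k, none) :: specGen drop t (k + 1) c
    else (k, some c) :: specGen drop t (k + 1) (c + 1)

-- closed form of B's counts list: entry j is the number of kept entries among the first j
def countsF (keep : List Bool) : List Int :=
  (List.range (keep.length + 1)).map (fun j => ((keep.take j).countP (fun b => b) : Int))

-- A's loop, from an arbitrary state whose dict items are ps with keys all < k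
theorem A_fold (drop : List String) (names : List String) : ∀ (k c : Int)
    (ps : List (Int × Option Int)) (nn : List String),
    (∀ j, k ≤ j → (ps.any (fun p => p.1 == j)) = false) →
    (PySem.List.enumerate names k).foldl
      (fun (st : PySem.Dict Int (Option Int) × List String × Int) (p : Int × String) =>
        if drop.contains p.2 then
          (st.1.insert p.1 none, st.2.1, st.2.2)
        else
          (st.1.insert p.1 (some st.2.2), st.2.1 ++ [p.2], st.2.2 + 1))
      (PySem.Dict.mk ps, nn, c)
    = (PySem.Dict.mk (ps ++ specGen drop names k c),
       nn ++ names.filter (fun n => !(drop.contains n)),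
       c + ((names.countP (fun n => !(drop.contains n))) : Int)) := by
  induction names with
  | nil => intro k c ps nn _; simp [specGen]
  | cons n t ih =>
    intro k c ps nn h
    rw [PySem.List.enumerate_cons, List.foldl_cons]
    have hins : ∀ v, (PySem.Dict.mk ps).insert k v = PySem.Dict.mk (ps ++ [(k, v)]) := by
      intro v
      apply PySem.Dict.ext
      rw [PySem.Dict.items_insert_of_not_contains]
      · rw [PySem.Dict.contains_mk]; exact h k le_rfl
    have hfresh : ∀ v, ∀ j, k + 1 ≤ j → ((ps ++ [(k, v)]).any (fun p => p.1 == j)) = false := by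
      intro v j hj
      rw [List.any_append]
      have h1 : ps.any (fun p => p.1 == j) = false := h j (by omega)
      have h2 : (k == j) = false := by simp; omega
      simp [h1, h2]
    by_cases hd : drop.contains n = true
    · have hm : n ∈ drop := by simpa using hd
      simp only [hd, if_true, hins]
      rw [ih (k + 1) c (ps ++ [(k, none)]) nn (hfresh none)]
      simp [specGen, hm, List.append_assoc]
    · have hcf : drop.contains n = false := by simpa using hd
      have hm : ¬ n ∈ drop := by simpa using hd
      simp only [hcf, Bool.false_eq_true, if_false, hins]
      rw [ih (k + 1) (c + 1) (ps ++ [(k, some c)]) (nn ++ [n]) (hfresh (some c))]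
      simp [specGen, hm, List.append_assoc, Prod.ext_iff]
      ring

-- B's new_names comprehension over zip(old_names, keep) is the plain filter
theorem zip_filter_map (f : String → Bool) (names : List String) :
    (((names.zip (names.map f)).filter (fun p => p.2)).map (fun p => p.1))
    = names.filter f := by
  induction names with
  | nil => rfl
  | cons n t ih =>
    by_cases hf : f n = true <;> simp [hf, ih]

-- appending one mask entry extends the prefix-count list by one entry
theorem countsF_snoc (pre : List Bool) (k : Bool) :
    countsF (pre ++ [k])
      = countsF pre ++ [((pre.countP (fun b => b)) : Int) + (if k then (1 : Int) else 0)] := by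
  unfold countsF
  rw [List.length_append, List.length_singleton, List.range_succ, List.map_append]
  congr 1
  · apply List.map_congr_left
    intro j hj
    rw [List.mem_range] at hj
    rw [List.take_append_of_le_length (by omega)]
  · rw [List.map_singleton, List.take_of_length_le (by simp)]
    simp [List.countP_append]

-- B's counts loop computes the prefix-count list countsF
theorem counts_loop : ∀ (rest pre : List Bool),
    rest.foldl
      (fun (acc : List Int) (k : Bool) =>
        acc ++ [PySem.List.pyGetD acc (-1) 0 + (if k then (1 : Int) else 0)])
      (countsF pre)
    = countsF (pre ++ rest) := by
  intro rest
  induction rest with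
  | nil => intro pre; simp
  | cons k t ih =>
    intro pre
    rw [List.foldl_cons]
    have hsplit : countsF pre
        = (List.range pre.length).map (fun j => (((pre.take j).countP (fun b => b)) : Int))
          ++ [((pre.countP (fun b => b)) : Int)] := by
      unfold countsF
      rw [List.range_succ, List.map_append]
      simp
    have hlast : PySem.List.pyGetD (countsF pre) (-1) 0
        = ((pre.countP (fun b => b)) : Int) := by
      rw [hsplit]
      exact PySem.List.pyGetD_neg_one_append_singleton _ _ _
    rw [hlast, ← countsF_snoc, ih (pre ++ [k]), List.append_assoc, List.singleton_append]

-- the full counts list, as built by B from [0]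
theorem counts_eq (keep : List Bool) :
    keep.foldl
      (fun (acc : List Int) (k : Bool) =>
        acc ++ [PySem.List.pyGetD acc (-1) 0 + (if k then (1 : Int) else 0)])
      [(0 : Int)]
    = countsF keep := by
  have h0 : ([(0 : Int)] : List Int) = countsF [] := by simp [countsF]
  rw [h0, counts_loop keep [], List.nil_append]

-- reading counts[j] gives the prefix count
theorem counts_get (keep : List Bool) (j : Nat) (hj : j < keep.length + 1) :
    PySem.List.pyGetD (countsF keep) (j : Int) 0
      = (((keep.take j).countP (fun b => b)) : Int) := by
  rw [PySem.List.pyGetD_natCast]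
  unfold countsF
  rw [List.getD_eq_getElem _ _ (by simpa using hj)]
  simp

-- B's dict-comprehension values: the prefix count of kept entries is exactly the running
-- counter of specGen; generalized over an already-processed prefix 'pre'
theorem B_gen (drop : List String) (names : List String) : ∀ (pre : List String),
    (PySem.List.enumerate (names.map (fun n => !(drop.contains n))) (pre.length : Int)).map
      (fun p => (p.1,
        if p.2 then
          some (PySem.List.pyGetD (countsF ((pre ++ names).map (fun n => !(drop.contains n)))) p.1 0)
        else none))
    = specGen drop names (pre.length) ((pre.countP (fun n => !(drop.contains n))) : Int) := by
  induction names with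
  | nil => intro pre; simp [specGen]
  | cons n t ih =>
    intro pre
    rw [List.map_cons, PySem.List.enumerate_cons, List.map_cons]
    have hval : PySem.List.pyGetD
        (countsF ((pre ++ n :: t).map (fun n => !(drop.contains n)))) ((pre.length : Nat) : Int) 0
        = ((pre.countP (fun n => !(drop.contains n))) : Int) := by
      rw [counts_get _ pre.length (by simp)]
      have htake : (((pre ++ n :: t).map (fun n => !(drop.contains n))).take pre.length)
          = pre.map (fun n => !(drop.contains n)) := by
        rw [List.map_append,
            List.take_append_of_le_length (by simp), List.take_of_length_le (by simp)]
      rw [htake, List.countP_map]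
      rfl
    have e1 : (((pre ++ [n]).length : Nat) : Int) = (pre.length : Int) + 1 := by simp
    have hstep := ih (pre ++ [n])
    rw [e1, List.append_assoc, List.singleton_append] at hstep
    by_cases hd : drop.contains n = true
    · have hm : n ∈ drop := by simpa using hd
      have e2 : List.countP (fun m => !drop.contains m) (pre ++ [n])
          = List.countP (fun m => !drop.contains m) pre := by
        simp [List.countP_append, hm]
      rw [e2] at hstep
      simp only [hd, Bool.not_true, Bool.false_eq_true, if_false, specGen, if_true, hstep]
    · have hcf : drop.contains n = false := by simpa using hd
      have hm : ¬ n ∈ drop := by simpa using hd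
      have e2 : List.countP (fun m => !drop.contains m) (pre ++ [n])
          = List.countP (fun m => !drop.contains m) pre + 1 := by
        simp [List.countP_append, hm]
      rw [e2] at hstep
      push_cast at hstep
      simp only [hcf, Bool.not_false, if_true, hval, specGen,
        Bool.false_eq_true, if_false, hstep]

-- the keys inserted by B's dict comprehension are distinct
theorem nodup_fst_enumerate {α : Type} (xs : List α) (s : Int) :
    ((PySem.List.enumerate xs s).map (fun p => p.1)).Nodup := by
  have h := PySem.List.pairwise_lt_enumerate xs s
  exact (List.pairwise_map.mpr (h.imp (fun hlt => ne_of_lt hlt)))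

-- set(drop_classes) membership is list membership
theorem dedup_contains (drop : List String) (nm : String) :
    (PySem.List.dedup drop).contains nm = drop.contains nm := by
  by_cases h : nm ∈ drop <;> simp [h]

-- ===== VERDICT (by name: the statement is the Claim_ definition above) =====
theorem build_id_map_py_spec : Claim_equal_build_id_map_py := by
  intro old drop _
  unfold Spec_build_id_map_py build_id_map_py build_id_map_py_alt
  dsimp only
  simp only [dedup_contains, counts_eq]
  have hempty : (PySem.Dict.empty : PySem.Dict Int (Option Int)) = PySem.Dict.mk [] := rfl
  have hA := A_fold drop old 0 0 [] [] (by simp)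
  rw [hempty, hA]
  have hB := PySem.Dict.items_foldl_insert_fresh
    (PySem.List.enumerate (old.map (fun name => !(drop.contains name))) 0)
    (fun p => p.1)
    (fun p => if p.2 then
        some (PySem.List.pyGetD (countsF (old.map (fun name => !(drop.contains name)))) p.1 0)
      else none)
    PySem.Dict.empty
    (by intro a _; exact PySem.Dict.contains_empty _)
    (nodup_fst_enumerate _ 0)
  rw [hempty] at hB
  beta_reduce at hB
  rw [hB]
  have hBgen := B_gen drop old ([] : List String)
  simp only [List.length_nil, List.countP_nil, List.nil_append, Nat.cast_zero] at hBgen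
  dsimp only
  rw [hBgen, zip_filter_map (fun n => !(drop.contains n)) old]
  simp
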